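-- pv_equiv track=rewrite | github.com/ZILLABB/betsightly | backend/scripts/daily_predictions_production.py | find_similar_team_name
-- ===== SOURCE A (Python) =====
-- def find_similar_team_name(team_name, team_names_list):
--     """
--     Find the most similar team name in the list.
--
--     Args:
--         team_name: Team name to find
--         team_names_list: List of team names to search in
--
--     Returns:
--         Most similar team name
--     """
--     # Check for exact match
--     if team_name in team_names_list:
--         return team_name
--
--     # Check for case-insensitive match
--     for name in team_names_list:
--         if team_name.lower() == name.lower():
--             return name
--
--     # Check for partial match
--     for name in team_names_list:
--         if team_name.lower() in name.lower() or name.lower() in team_name.lower():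
--             return name
--
--     # Return original name if no match found
--     return team_name
-- ===== SOURCE B (Python) =====
-- def find_similar_team_name(team_name, team_names_list):
--     # Exact match first (uses ==, never .lower()).
--     if team_name in team_names_list:
--         return team_name
--     t = team_name.lower()
--     partial = None
--     # One pass: return the first case-insensitive match immediately;
--     # remember the first partial match as a fallback.
--     for name in team_names_list:
--         n = name.lower()
--         if t == n:
--             return name
--         if partial is None and (t in n or n in t):
--             partial = name
--     return partial if partial is not None else team_name
-- ===== Notes on version B (the rewrite author's own statement) =====
-- stated objective: faster
-- what changed: The two remaining full scans (case-insensitive, then partial) are fused into a single pass that returns on the first case-insensitive match and carries the first partial match in one variable, computing each name's .lower() once instead of up to three times.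
import Mathlib
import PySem

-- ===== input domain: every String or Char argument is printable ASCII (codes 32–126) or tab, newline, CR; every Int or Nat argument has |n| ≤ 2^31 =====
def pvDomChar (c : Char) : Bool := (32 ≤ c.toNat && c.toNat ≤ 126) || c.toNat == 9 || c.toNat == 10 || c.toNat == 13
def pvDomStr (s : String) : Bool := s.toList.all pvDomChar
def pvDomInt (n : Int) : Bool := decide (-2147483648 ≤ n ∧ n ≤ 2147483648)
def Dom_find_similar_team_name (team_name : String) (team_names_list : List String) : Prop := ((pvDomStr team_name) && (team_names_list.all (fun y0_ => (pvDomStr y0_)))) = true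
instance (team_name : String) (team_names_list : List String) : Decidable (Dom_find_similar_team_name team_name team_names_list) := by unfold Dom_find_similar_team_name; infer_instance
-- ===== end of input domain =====

-- B fuses A's two remaining scans (case-insensitive, then partial) into one pass
-- carrying the first partial match; same return value, fewer scans and .lower() calls.

-- ===== PORT A =====
-- A's second block: for name in list: if team_name.lower() == name.lower(): return name
def pvA_ciLoop (team_name : String) : List String → Option String
  | [] => none
  | name :: rest =>
    if PySem.Str.lower team_name == PySem.Str.lower name then some name
    else pvA_ciLoop team_name rest

-- A's third block: for name in list: if t.lower() in name.lower() or name.lower() in t.lower(): return name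
def pvA_partialLoop (team_name : String) : List String → Option String
  | [] => none
  | name :: rest =>
    if PySem.Str.isIn (PySem.Str.lower team_name) (PySem.Str.lower name)
       || PySem.Str.isIn (PySem.Str.lower name) (PySem.Str.lower team_name) then some name
    else pvA_partialLoop team_name rest

def find_similar_team_name (team_name : String) (team_names_list : List String) : String :=
  if team_name ∈ team_names_list then team_name
  else
    match pvA_ciLoop team_name team_names_list with
    | some name => name
    | none =>
      match pvA_partialLoop team_name team_names_list with
      | some name => name
      | none => team_name

-- ===== PORT B =====
-- B's single loop: t = team_name.lower(), p = the 'partial' variable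
def pvB_loop (team_name t : String) (p : Option String) : List String → String
  | [] => p.getD team_name
  | name :: rest =>
    let n := PySem.Str.lower name
    if t == n then name
    else
      pvB_loop team_name t
        (if p.isNone && (PySem.Str.isIn t n || PySem.Str.isIn n t) then some name else p)
        rest

def find_similar_team_name_alt (team_name : String) (team_names_list : List String) : String :=
  if team_name ∈ team_names_list then team_name
  else pvB_loop team_name (PySem.Str.lower team_name) none team_names_list

-- ===== PRECONDITION & SPEC =====
def Spec_find_similar_team_name (team_name : String) (team_names_list : List String) (out : String) : Prop := out = find_similar_team_name_alt team_name team_names_list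
instance (team_name : String) (team_names_list : List String) (out : String) : Decidable (Spec_find_similar_team_name team_name team_names_list out) := by unfold Spec_find_similar_team_name; infer_instance

-- ===== CLAIM (what is proved, stated in full; the proofs are below) =====
def Claim_equal_find_similar_team_name : Prop := ∀ (team_name : String) (team_names_list : List String), Dom_find_similar_team_name team_name team_names_list → Spec_find_similar_team_name team_name team_names_list (find_similar_team_name team_name team_names_list)

-- ===== LEMMAS AND PROOFS =====

-- Loop invariant: B's fused loop returns the first ci match if any, else the
-- carried partial (if set), else the first partial match, else team_name.
theorem pvB_loop_eq (team_name : String) (p : Option String) (l : List String) :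
    pvB_loop team_name (PySem.Str.lower team_name) p l =
      match pvA_ciLoop team_name l with
      | some n => n
      | none =>
        match p with
        | some q => q
        | none => (pvA_partialLoop team_name l).getD team_name := by
  induction l generalizing p with
  | nil => cases p <;> simp [pvB_loop, pvA_ciLoop, pvA_partialLoop]
  | cons name rest ih =>
    by_cases hci : (PySem.Str.lower team_name == PySem.Str.lower name) = true
    · simp [pvB_loop, pvA_ciLoop, hci]
    · cases p with
      | some q => simp [pvB_loop, pvA_ciLoop, hci, ih]
      | none =>
        simp only [pvB_loop, pvA_ciLoop, pvA_partialLoop, hci, ih, Bool.false_eq_true,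
          if_false, Option.isNone_none, Bool.true_and]
        split
        · simp
        · by_cases hp : (PySem.Str.isIn (PySem.Str.lower team_name) (PySem.Str.lower name)
              || PySem.Str.isIn (PySem.Str.lower name) (PySem.Str.lower team_name)) = true
          · simp only [PySem.Str.isIn, PySem.Str.toList_lower, Bool.or_eq_true] at hp
            simp [hp]
          · simp only [PySem.Str.isIn, PySem.Str.toList_lower, Bool.or_eq_true] at hp
            simp [hp]

-- ===== VERDICT (by name: the statement is the Claim_ definition above) =====
theorem find_similar_team_name_spec : Claim_equal_find_similar_team_name := by
  intro team_name team_names_list _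
  unfold Spec_find_similar_team_name find_similar_team_name find_similar_team_name_alt
  by_cases hmem : team_name ∈ team_names_list
  · simp [hmem]
  · simp only [hmem, if_false]
    rw [pvB_loop_eq]
    cases h : pvA_ciLoop team_name team_names_list with
    | some n => simp
    | none =>
      cases pvA_partialLoop team_name team_names_list <;> simp [Option.getD]
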